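-- pv_equiv track=rewrite | github.com/icycookies/OpenBioMed_new | open_biomed/utils/misc.py | collate_objects_as_list
-- ===== SOURCE A (Python) =====
-- from typing import Any, Dict, List, Optional, TextIO
--
-- def collate_objects_as_list(inputs: List[Dict[str, Any]]) -> Dict[str, Any]:
--     outputs = {}
--     for sample in inputs:
--         for k, v in sample.items():
--             if k not in outputs:
--                 outputs[k] = []
--             outputs[k].append(v)
--     return outputs
-- ===== SOURCE B (Python) =====
-- def collate_objects_as_list(inputs):
--     # key-major (column) traversal: first collect distinct keys in first-appearance
--     # order, then gather each key's values with one scan per key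
--     keys = list(dict.fromkeys(k for sample in inputs for k in sample))
--     return {k: [v for sample in inputs for k2, v in sample.items() if k2 == k]
--             for k in keys}
-- ===== Notes on version B (the rewrite author's own statement) =====
-- stated objective: alternative
-- what changed: A fills a dict of lists in one sample-major interleaved pass; B first dedups the keys in first-appearance order and then builds each output list by a key-major scan over all samples.
import Mathlib
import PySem

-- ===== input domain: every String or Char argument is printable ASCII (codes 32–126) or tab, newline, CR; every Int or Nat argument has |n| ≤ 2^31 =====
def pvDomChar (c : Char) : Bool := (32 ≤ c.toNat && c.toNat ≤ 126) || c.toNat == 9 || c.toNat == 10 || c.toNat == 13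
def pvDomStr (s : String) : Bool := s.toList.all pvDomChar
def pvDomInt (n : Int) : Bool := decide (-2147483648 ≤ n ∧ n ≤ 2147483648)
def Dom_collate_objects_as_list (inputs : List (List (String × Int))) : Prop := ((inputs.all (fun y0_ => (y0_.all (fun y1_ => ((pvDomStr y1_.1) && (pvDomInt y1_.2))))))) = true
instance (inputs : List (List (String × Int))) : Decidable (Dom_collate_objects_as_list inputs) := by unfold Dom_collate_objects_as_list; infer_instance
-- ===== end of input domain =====

-- B replaces A's sample-major dict-filling pass by a key-major traversal (dedup the
-- keys in first-appearance order, then gather each key's values); alternative, not faster.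


-- ===== PORT A =====
-- `if k not in outputs: outputs[k] = []` then `outputs[k].append(v)`
def collateStepA (outputs : PySem.Dict String (List Int)) (kv : String × Int) :
    PySem.Dict String (List Int) :=
  let outputs := if outputs.contains kv.1 then outputs else outputs.insert kv.1 []
  outputs.modify kv.1 [] (fun l => l ++ [kv.2])

def collate_objects_as_list (inputs : List (List (String × Int))) : List (String × List Int) :=
  (inputs.foldl (fun outputs sample => sample.foldl collateStepA outputs)
    PySem.Dict.empty).items

-- ===== PORT B =====
def collate_objects_as_list_alt (inputs : List (List (String × Int))) : List (String × List Int) :=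
  (PySem.List.dedup (inputs.flatMap (fun sample => sample.map Prod.fst))).map (fun k =>
    (k, inputs.flatMap (fun sample =>
          (sample.filter (fun kv => kv.1 == k)).map Prod.snd)))

-- ===== PRECONDITION & SPEC =====
def Spec_collate_objects_as_list (inputs : List (List (String × Int))) (out : List (String × List Int)) : Prop := out = collate_objects_as_list_alt inputs
instance (inputs : List (List (String × Int))) (out : List (String × List Int)) : Decidable (Spec_collate_objects_as_list inputs out) := by unfold Spec_collate_objects_as_list; infer_instance

-- ===== CLAIM (what is proved, stated in full; the proofs are below) =====
def Claim_equal_collate_objects_as_list : Prop := ∀ (inputs : List (List (String × Int))), Dom_collate_objects_as_list inputs → Spec_collate_objects_as_list inputs (collate_objects_as_list inputs)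

-- ===== LEMMAS AND PROOFS =====

-- A's per-entry step equals a plain `modify … (· ++ [v])` step
theorem collateStepA_eq_modify (o : PySem.Dict String (List Int)) (kv : String × Int) :
    collateStepA o kv = o.modify kv.1 [] (fun l => l ++ [kv.2]) := by
  unfold collateStepA
  by_cases h : o.contains kv.1
  · simp [h]
  · simp only [Bool.not_eq_true] at h
    simp only [h]
    simp [PySem.Dict.modify, PySem.Dict.getD_insert_self,
      PySem.Dict.getD_of_not_contains _ _ h, PySem.Dict.insert_insert_self]

-- the nested sample-major double fold is the fold over the concatenation of the samples
theorem foldl_foldl_eq_foldl_flatMap (inputs : List (List (String × Int)))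
    (d : PySem.Dict String (List Int)) :
    inputs.foldl (fun outputs sample => sample.foldl collateStepA outputs) d
      = (inputs.flatMap (fun s => s)).foldl collateStepA d := by
  induction inputs generalizing d with
  | nil => rfl
  | cons s rest ih => simp [List.flatMap_cons, List.foldl_append, ih]

-- ===== VERDICT (by name: the statement is the Claim_ definition above) =====
theorem collate_objects_as_list_spec : Claim_equal_collate_objects_as_list := by
  intro inputs _
  unfold Spec_collate_objects_as_list collate_objects_as_list collate_objects_as_list_alt
  rw [foldl_foldl_eq_foldl_flatMap]
  rw [funext fun o => funext fun kv => collateStepA_eq_modify o kv]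
  set ps := inputs.flatMap (fun s => s) with hps
  have hnd : (ps.foldl (fun d p => d.modify p.1 [] (fun l => l ++ [p.2]))
      PySem.Dict.empty).keys.Nodup :=
    PySem.Dict.nodup_keys_foldl_modify_key ps Prod.fst []
      (fun _ p l => l ++ [p.2]) PySem.Dict.empty (PySem.Dict.nodup_keys_empty)
  rw [PySem.Dict.items_eq_map_keys _ hnd []]
  rw [PySem.Dict.keys_foldl_modify_key ps Prod.fst [] (fun _ p l => l ++ [p.2])]
  have hkeys : PySem.Set.update (PySem.Dict.empty : PySem.Dict String (List Int)).keys (ps.map Prod.fst)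
      = PySem.List.dedup (inputs.flatMap (fun sample => sample.map Prod.fst)) := by
    rw [PySem.List.dedup_eq_ofList, hps, List.map_flatMap]
    rfl
  rw [hkeys]
  apply List.map_congr_left
  intro k _
  rw [PySem.Dict.getD_foldl_modify_append, PySem.Dict.getD_empty, List.nil_append]
  rw [hps, List.filter_flatMap, List.map_flatMap]
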